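-- pv_equiv track=rewrite | github.com/RitaTMCO/IST_MEIC-A | Harvest Scheduling-SAT-MaxSAT-PB_ALC/proj1.py | createVariables
-- ===== SOURCE A (Python) =====
-- def createVariables(numberOfUnits,numberOfPeriods,numberOfAdjacents):
--     u = [[i+1 + j*numberOfUnits for j in range(numberOfPeriods)] for i in range(numberOfUnits)]
--
--     p = list()
--     for i in  range(numberOfUnits):
--         add = numberOfPeriods*numberOfUnits
--         if i != 0:
--             add = p[i-1][-1]
--         p += [[add + 1 + j  for j in range(numberOfAdjacents[i] + 1)]]
--
--     d = list()
--     for i in  range(numberOfUnits):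
--         add = p[-1][-1]
--         if i != 0:
--             add = d[i-1][-1]
--         d += [[add + 1 + j  for j in range(numberOfUnits)]]
--
--     natural = [ d[-1][-1] + 1 + i for i in range(numberOfUnits)]
--
--     return u,natural,p,d
-- ===== SOURCE B (Python) =====
-- def createVariables(numberOfUnits, numberOfPeriods, numberOfAdjacents):
--     # Closed-form id arithmetic: every block start is a prefix-sum formula,
--     # no row is ever derived from a previously built row or a running counter.
--     n, T = numberOfUnits, numberOfPeriods
--     start = lambda i: n * T + 1 + sum(numberOfAdjacents[k] + 1 for k in range(i))
--     u = [[j * n + i + 1 for j in range(T)] for i in range(n)]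
--     p = [list(range(start(i), start(i + 1))) for i in range(n)]
--     dbase = start(n) - 1
--     d = [[dbase + i * n + j + 1 for j in range(n)] for i in range(n)]
--     natural = [dbase + n * n + i + 1 for i in range(n)]
--     return u, natural, p, d
-- ===== Notes on version B (the rewrite author's own statement) =====
-- stated objective: alternative
-- what changed: B replaces A's sequential construction (each p/d row start read from the previous row's last element p[i-1][-1]/d[i-1][-1]/d[-1][-1]) by closed-form index arithmetic: every row is computed independently from a prefix-sum formula start(i) = n*T + 1 + sum(adj[k]+1 for k<i), with d and natural as pure affine formulas off start(n).
import Mathlib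
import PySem

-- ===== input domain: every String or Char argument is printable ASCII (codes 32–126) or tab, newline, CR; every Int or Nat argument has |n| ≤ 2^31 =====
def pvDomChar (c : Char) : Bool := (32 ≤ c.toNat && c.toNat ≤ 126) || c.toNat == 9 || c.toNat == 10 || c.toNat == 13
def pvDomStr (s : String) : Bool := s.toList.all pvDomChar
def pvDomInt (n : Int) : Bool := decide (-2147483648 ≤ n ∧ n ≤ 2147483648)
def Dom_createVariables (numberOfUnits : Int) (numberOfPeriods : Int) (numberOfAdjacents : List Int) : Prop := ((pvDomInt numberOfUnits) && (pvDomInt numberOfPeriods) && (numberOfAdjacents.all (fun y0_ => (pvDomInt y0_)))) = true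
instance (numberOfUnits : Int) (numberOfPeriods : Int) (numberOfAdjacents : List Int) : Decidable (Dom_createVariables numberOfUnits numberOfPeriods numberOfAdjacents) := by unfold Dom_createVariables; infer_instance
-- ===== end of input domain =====

-- B replaces A's sequential construction (each row start read from the previous row's
-- last element) by closed-form index arithmetic: every row is computed independently
-- from a prefix-sum formula; objective: alternative decomposition, same cost.

-- ===== PORT A =====
-- pyGetD defaults (0 / []) are only reached outside Pre_createVariables, where Python raises IndexError.
def createVariables (numberOfUnits : Int) (numberOfPeriods : Int) (numberOfAdjacents : List Int) : List (List Int) × List Int × List (List Int) × List (List Int) :=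
  let u : List (List Int) := (PySem.List.pyRange 0 numberOfUnits 1).map (fun i =>
    (PySem.List.pyRange 0 numberOfPeriods 1).map (fun j => i + 1 + j * numberOfUnits))
  let p : List (List Int) := (PySem.List.pyRange 0 numberOfUnits 1).foldl (fun p i =>
    let add : Int := if i ≠ 0 then PySem.List.pyGetD (PySem.List.pyGetD p (i - 1) []) (-1) 0
                     else numberOfPeriods * numberOfUnits
    p ++ [(PySem.List.pyRange 0 (PySem.List.pyGetD numberOfAdjacents i 0 + 1) 1).map (fun j => add + 1 + j)]) []
  let d : List (List Int) := (PySem.List.pyRange 0 numberOfUnits 1).foldl (fun d i =>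
    let add : Int := if i ≠ 0 then PySem.List.pyGetD (PySem.List.pyGetD d (i - 1) []) (-1) 0
                     else PySem.List.pyGetD (PySem.List.pyGetD p (-1) []) (-1) 0
    d ++ [(PySem.List.pyRange 0 numberOfUnits 1).map (fun j => add + 1 + j)]) []
  let natural : List Int := (PySem.List.pyRange 0 numberOfUnits 1).map (fun i =>
    PySem.List.pyGetD (PySem.List.pyGetD d (-1) []) (-1) 0 + 1 + i)
  (u, natural, p, d)

-- ===== PORT B =====
def createVariables_alt (numberOfUnits : Int) (numberOfPeriods : Int) (numberOfAdjacents : List Int) : List (List Int) × List Int × List (List Int) × List (List Int) :=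
  -- start i = n*T + 1 + sum(adj[k] + 1 for k in range(i))
  let start : Int → Int := fun i =>
    numberOfUnits * numberOfPeriods + 1 +
      ((PySem.List.pyRange 0 i 1).map (fun k => PySem.List.pyGetD numberOfAdjacents k 0 + 1)).sum
  let u : List (List Int) := (PySem.List.pyRange 0 numberOfUnits 1).map (fun i =>
    (PySem.List.pyRange 0 numberOfPeriods 1).map (fun j => j * numberOfUnits + i + 1))
  let p : List (List Int) := (PySem.List.pyRange 0 numberOfUnits 1).map (fun i =>
    PySem.List.pyRange (start i) (start (i + 1)) 1)
  let dbase : Int := start numberOfUnits - 1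
  let d : List (List Int) := (PySem.List.pyRange 0 numberOfUnits 1).map (fun i =>
    (PySem.List.pyRange 0 numberOfUnits 1).map (fun j => dbase + i * numberOfUnits + j + 1))
  let natural : List Int := (PySem.List.pyRange 0 numberOfUnits 1).map (fun i =>
    dbase + numberOfUnits * numberOfUnits + i + 1)
  (u, natural, p, d)

-- ===== PRECONDITION & SPEC =====
-- Pre_ excludes exactly the inputs where A raises IndexError: a positive unit count with
-- the adjacency list too short, or with a negative adjacency count among the first
-- numberOfUnits entries (the corresponding empty p-row is later indexed with [-1]).
def Pre_createVariables (numberOfUnits : Int) (numberOfPeriods : Int) (numberOfAdjacents : List Int) : Prop :=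
  numberOfUnits ≤ 0 ∨
    (numberOfUnits ≤ (numberOfAdjacents.length : Int) ∧
      ∀ x ∈ numberOfAdjacents.take numberOfUnits.toNat, 0 ≤ x)
instance (numberOfUnits : Int) (numberOfPeriods : Int) (numberOfAdjacents : List Int) : Decidable (Pre_createVariables numberOfUnits numberOfPeriods numberOfAdjacents) := by unfold Pre_createVariables; infer_instance

def pvWitness_createVariables : Int × Int × List Int := (2, 2, [0, 1])

def Spec_createVariables (numberOfUnits : Int) (numberOfPeriods : Int) (numberOfAdjacents : List Int) (out : List (List Int) × List Int × List (List Int) × List (List Int)) : Prop := out = createVariables_alt numberOfUnits numberOfPeriods numberOfAdjacents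
instance (numberOfUnits : Int) (numberOfPeriods : Int) (numberOfAdjacents : List Int) (out : List (List Int) × List Int × List (List Int) × List (List Int)) : Decidable (Spec_createVariables numberOfUnits numberOfPeriods numberOfAdjacents out) := by unfold Spec_createVariables; infer_instance

-- ===== CLAIM (what is proved, stated in full; the proofs are below) =====
def Claim_equal_createVariables : Prop := ∀ (numberOfUnits : Int) (numberOfPeriods : Int) (numberOfAdjacents : List Int), Dom_createVariables numberOfUnits numberOfPeriods numberOfAdjacents → Pre_createVariables numberOfUnits numberOfPeriods numberOfAdjacents → Spec_createVariables numberOfUnits numberOfPeriods numberOfAdjacents (createVariables numberOfUnits numberOfPeriods numberOfAdjacents)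

-- ===== LEMMAS AND PROOFS =====

lemma pv_map_shift (c w : Int) :
    (PySem.List.pyRange 0 w 1).map (fun j => c + j) = PySem.List.pyRange c (c + w) 1 := by
  rw [PySem.List.pyRange_one, PySem.List.pyRange_one]
  simp [List.map_map, Function.comp]

lemma pv_last_pyRange (a b : Int) (h : a < b) :
    PySem.List.pyGetD (PySem.List.pyRange a b 1) (-1) 0 = b - 1 := by
  have h1 : PySem.List.pyRange a b 1 = PySem.List.pyRange a (b - 1) 1 ++ [b - 1] := by
    have := PySem.List.pyRange_one_succ_right (a := a) (b := b - 1) (by omega)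
    simpa using this
  rw [h1, PySem.List.pyGetD_neg_one_append_singleton]

lemma pv_step_last (LA : List (List Int)) (c : Int) (k : Nat) (hk : 0 < k)
    (h2 : LA.length = k)
    (h3 : PySem.List.pyGetD (PySem.List.pyGetD LA (-1) []) (-1) 0 = c) :
    PySem.List.pyGetD (PySem.List.pyGetD LA ((k : Int) - 1) []) (-1) 0 = c := by
  have hne : LA ≠ [] := by
    intro h
    rw [h] at h2
    simp at h2
    omega
  have hc : ((k : Int) - 1) = ((k - 1 : Nat) : Int) := by omega
  rw [hc, PySem.List.pyGetD_natCast]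
  rw [PySem.List.pyGetD_neg_one _ _ hne, List.getLast_eq_getElem] at h3
  rw [List.getD_eq_getElem _ _ (by omega : k - 1 < LA.length)]
  convert h3 using 3
  omega

lemma pv_AB_fold (w : Int → Int) (A0 : Int) (k : Nat)
    (hw : ∀ i : Int, 0 ≤ i → i < (k : Int) → 1 ≤ w i) :
    (PySem.List.pyRange 0 (k : Int) 1).foldl
        (fun p i =>
          let add : Int := if i ≠ 0 then PySem.List.pyGetD (PySem.List.pyGetD p (i - 1) []) (-1) 0 else A0
          p ++ [(PySem.List.pyRange 0 (w i) 1).map (fun j => add + 1 + j)]) []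
      = ((PySem.List.pyRange 0 (k : Int) 1).foldl
          (fun (acc : List (List Int) × Int) i =>
            (acc.1 ++ [PySem.List.pyRange acc.2 (acc.2 + w i) 1], acc.2 + w i)) ([], A0 + 1)).1
    ∧ ((PySem.List.pyRange 0 (k : Int) 1).foldl
        (fun p i =>
          let add : Int := if i ≠ 0 then PySem.List.pyGetD (PySem.List.pyGetD p (i - 1) []) (-1) 0 else A0
          p ++ [(PySem.List.pyRange 0 (w i) 1).map (fun j => add + 1 + j)]) []).length = k
    ∧ (0 < k →
        PySem.List.pyGetD (PySem.List.pyGetD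
          ((PySem.List.pyRange 0 (k : Int) 1).foldl
            (fun p i =>
              let add : Int := if i ≠ 0 then PySem.List.pyGetD (PySem.List.pyGetD p (i - 1) []) (-1) 0 else A0
              p ++ [(PySem.List.pyRange 0 (w i) 1).map (fun j => add + 1 + j)]) []) (-1) []) (-1) 0
        = ((PySem.List.pyRange 0 (k : Int) 1).foldl
            (fun (acc : List (List Int) × Int) i =>
              (acc.1 ++ [PySem.List.pyRange acc.2 (acc.2 + w i) 1], acc.2 + w i)) ([], A0 + 1)).2 - 1) := by
  induction k with
  | zero => simp
  | succ k ih =>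
    have hw' : ∀ i : Int, 0 ≤ i → i < (k : Int) → 1 ≤ w i := fun i h1 h2 => hw i h1 (by push_cast; omega)
    obtain ⟨ih1, ih2, ih3⟩ := ih hw'
    have hwk : 1 ≤ w (k : Int) := hw (k : Int) (by positivity) (by push_cast; omega)
    have hcast : ((k + 1 : Nat) : Int) = (k : Int) + 1 := by push_cast; ring
    have hsplit : PySem.List.pyRange 0 ((k : Int) + 1) 1
        = PySem.List.pyRange 0 (k : Int) 1 ++ [(k : Int)] :=
      PySem.List.pyRange_one_succ_right (by positivity)
    rw [hcast, hsplit]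
    simp only [List.foldl_append, List.foldl_cons, List.foldl_nil]
    simp only [] at ih1 ih2 ih3
    rcases Nat.eq_zero_or_pos k with hk | hk
    · subst hk
      simp only [Nat.cast_zero] at hwk ⊢
      rw [PySem.List.pyRange_one_eq_nil (le_refl 0)]
      simp only [List.foldl_nil, ne_eq, not_true_eq_false, if_false, List.nil_append]
      rw [pv_map_shift]
      refine ⟨rfl, rfl, fun _ => ?_⟩
      rw [PySem.List.pyGetD_neg_one _ _ (List.cons_ne_nil _ _), List.getLast_singleton,
        pv_last_pyRange _ _ (by omega)]
    · have hne : ((k : Int)) ≠ 0 := by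
        intro h
        omega
      replace ih3 := ih3 hk
      rw [ih1] at ih2 ih3
      simp only [ih1]
      simp only [if_pos hne]
      simp only [pv_step_last _ _ k hk ih2 ih3]
      simp only [sub_add_cancel]
      simp only [pv_map_shift]
      refine ⟨trivial, ?_, fun _ => ?_⟩
      · simp [ih2]
      · rw [PySem.List.pyGetD_neg_one_append_singleton, pv_last_pyRange _ _ (by omega)]

-- the block-counter fold written as an independent map with prefix-sum starts
lemma pv_block_fold (w : Int → Int) (s0 : Int) (k : Nat) :
    (PySem.List.pyRange 0 (k : Int) 1).foldl
        (fun (acc : List (List Int) × Int) i =>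
          (acc.1 ++ [PySem.List.pyRange acc.2 (acc.2 + w i) 1], acc.2 + w i)) ([], s0)
      = ((PySem.List.pyRange 0 (k : Int) 1).map (fun i =>
            PySem.List.pyRange (s0 + ((PySem.List.pyRange 0 i 1).map w).sum)
              (s0 + ((PySem.List.pyRange 0 i 1).map w).sum + w i) 1),
         s0 + ((PySem.List.pyRange 0 (k : Int) 1).map w).sum) := by
  induction k with
  | zero => simp [PySem.List.pyRange_one_eq_nil (le_refl (0 : Int))]
  | succ k ih =>
    have hcast : ((k + 1 : Nat) : Int) = (k : Int) + 1 := by push_cast; ring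
    have hsplit : PySem.List.pyRange 0 ((k : Int) + 1) 1
        = PySem.List.pyRange 0 (k : Int) 1 ++ [(k : Int)] :=
      PySem.List.pyRange_one_succ_right (by positivity)
    rw [hcast, hsplit]
    simp only [List.foldl_append, List.foldl_cons, List.foldl_nil, List.map_append,
      List.map_cons, List.map_nil, List.sum_append, List.sum_cons, List.sum_nil]
    rw [ih]
    simp only [Prod.mk.injEq, add_zero]
    exact ⟨trivial, by ring⟩

-- ===== VERDICT (by name: the statement is the Claim_ definition above) =====
theorem createVariables_spec : Claim_equal_createVariables := by
  intro nU nP adj _ hpre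
  unfold Spec_createVariables createVariables createVariables_alt
  rcases (by omega : nU ≤ 0 ∨ 0 < nU) with hU | hU
  · rw [PySem.List.pyRange_one_eq_nil hU]
    simp only [List.map_nil, List.foldl_nil]
  · have hn : ((nU.toNat : Int)) = nU := Int.toNat_of_nonneg (le_of_lt hU)
    set n := nU.toNat with hndef
    have hn0 : 0 < n := by omega
    rw [← hn]
    rcases hpre with h | ⟨hlen, hnn⟩
    · omega
    -- width hypothesis for the p-phase
    have hwp : ∀ i : Int, 0 ≤ i → i < (n : Int) → 1 ≤ PySem.List.pyGetD adj i 0 + 1 := by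
      intro i h1 h2
      have hil : i < (adj.length : Int) := by omega
      rw [PySem.List.pyGetD_eq_getElem adj 0 h1 hil]
      have htk : i.toNat < (adj.take n).length := by
        simp only [List.length_take]
        omega
      have := hnn ((adj.take n)[i.toNat]) (List.getElem_mem htk)
      rw [List.getElem_take] at this
      omega
    have hp := pv_AB_fold (fun i => PySem.List.pyGetD adj i 0 + 1) (nP * (n : Int)) n hwp
    simp only [] at hp
    obtain ⟨hp1, hp2, hp3⟩ := hp
    replace hp3 := hp3 hn0
    rw [show ((n : Int) * nP) = nP * (n : Int) from mul_comm _ _]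
    simp only [hp3]
    have hblockp := pv_block_fold (fun i => PySem.List.pyGetD adj i 0 + 1) (nP * (n : Int) + 1) n
    have hd := pv_AB_fold (fun _ => (n : Int))
      (((PySem.List.pyRange 0 ((n : Int)) 1).foldl
          (fun (acc : List (List Int) × Int) i =>
            (acc.1 ++ [PySem.List.pyRange acc.2 (acc.2 + (PySem.List.pyGetD adj i 0 + 1)) 1],
              acc.2 + (PySem.List.pyGetD adj i 0 + 1))) ([], nP * (n : Int) + 1)).2 - 1) n
      (fun _ _ _ => by change (1:Int) ≤ (n:Int); omega)
    simp only [sub_add_cancel] at hd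
    obtain ⟨hd1, hd2, hd3⟩ := hd
    replace hd3 := hd3 hn0
    simp only [hd3]
    -- abbreviations
    set S : Int → Int := fun i => ((PySem.List.pyRange 0 i 1).map (fun k => PySem.List.pyGetD adj k 0 + 1)).sum with hS
    have hpend : ((PySem.List.pyRange 0 ((n : Int)) 1).foldl
          (fun (acc : List (List Int) × Int) i =>
            (acc.1 ++ [PySem.List.pyRange acc.2 (acc.2 + (PySem.List.pyGetD adj i 0 + 1)) 1],
              acc.2 + (PySem.List.pyGetD adj i 0 + 1))) ([], nP * (n : Int) + 1)).2
        = nP * (n : Int) + 1 + S (n : Int) := by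
      rw [hblockp]
    have hdblock := pv_block_fold (fun _ => (n : Int)) (nP * (n : Int) + 1 + S (n : Int)) n
    have hSconst : ∀ i : Int, 0 ≤ i →
        ((PySem.List.pyRange 0 i 1).map (fun _ => (n : Int))).sum = i * (n : Int) := by
      intro i hi
      rw [List.map_const', List.sum_replicate, PySem.List.length_pyRange_one, nsmul_eq_mul]
      have h0 : (((i - 0).toNat : Nat) : Int) = i := by omega
      rw [h0]
    refine Prod.ext ?_ (Prod.ext ?_ (Prod.ext ?_ ?_))
    · -- u component
      apply List.map_congr_left
      intro i _
      apply List.map_congr_left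
      intro j _
      ring
    · -- natural component
      rw [hpend, hdblock]
      refine List.map_congr_left fun i _ => ?_
      rw [hSconst ((n : Int)) (by positivity)]
      ring
    · -- p component
      rw [hp1, hblockp]
      refine List.map_congr_left fun i hi => ?_
      rw [PySem.List.mem_pyRange_one] at hi
      congr 1
      rw [PySem.List.pyRange_one_succ_right hi.1]
      simp only [List.map_append, List.sum_append, List.map_cons, List.map_nil,
        List.sum_cons, List.sum_nil]
      ring
    · -- d component
      rw [hd1, hpend, hdblock]
      refine List.map_congr_left fun i hi => ?_
      rw [PySem.List.mem_pyRange_one] at hi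
      rw [hSconst i hi.1]
      apply List.ext_getElem
      · simp only [List.length_map, PySem.List.length_pyRange_one]
        omega
      · intro m h1 h2
        simp only [List.getElem_map, PySem.List.getElem_pyRange_one]
        ring
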